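-- pv_equiv track=rewrite | github.com/rubencart/USCOCO | src/data/tree_utils.py | tg_to_right_branching
-- ===== SOURCE A (Python) =====
-- def tg_to_right_branching(actions):
--     new_output_actions = []
--     reduce_outputs = []
--     for action in actions:
--         if action.startswith("NT("):
--             nt = action[3:-1]
--             new_output_actions.append(action)
--             reduce_outputs.append("REDUCE({})".format(nt))
--             reduce_outputs.append("REDUCE({})".format(nt))
--         elif action.startswith("REDUCE("):
--             pass
--         else:
--             new_output_actions.append(action)
--     reduce_outputs.reverse()
--     new_output_actions.extend(reduce_outputs)
--     return new_output_actions
-- ===== SOURCE B (Python) =====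
-- def tg_to_right_branching(actions):
--     # Right-to-left fold with structural placement of closers: the transformed
--     # remainder is extended on both sides, so this NT's two closing REDUCEs land
--     # after all closers of later NTs -- no reduce accumulator and no reversal.
--     result = []
--     for a in reversed(actions):
--         if a.startswith("NT("):
--             r = "REDUCE({})".format(a[3:-1])
--             result = [a] + result + [r, r]
--         elif a.startswith("REDUCE("):
--             pass
--         else:
--             result = [a] + result
--     return result
-- ===== Notes on version B (the rewrite author's own statement) =====
-- stated objective: alternative
-- what changed: Replaces A's left-to-right loop with a running reduce accumulator plus a final in-place reversal by a right-to-left fold that wraps the already-transformed remainder, placing each NT's two closing REDUCEs structurally after it, so no reduce accumulator, no filter and no reversal step exist.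
import Mathlib
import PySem

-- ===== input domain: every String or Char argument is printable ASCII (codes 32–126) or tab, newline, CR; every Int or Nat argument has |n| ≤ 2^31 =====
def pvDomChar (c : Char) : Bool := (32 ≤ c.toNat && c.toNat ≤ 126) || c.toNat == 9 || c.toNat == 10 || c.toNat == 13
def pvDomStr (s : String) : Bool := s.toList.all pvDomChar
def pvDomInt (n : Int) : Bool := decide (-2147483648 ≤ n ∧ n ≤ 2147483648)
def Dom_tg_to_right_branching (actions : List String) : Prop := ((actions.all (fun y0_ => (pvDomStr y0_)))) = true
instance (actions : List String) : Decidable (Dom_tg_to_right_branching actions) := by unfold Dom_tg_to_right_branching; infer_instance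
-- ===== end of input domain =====

-- B replaces A's left-to-right loop (running reduce accumulator + final reversal) by a
-- right-to-left fold that wraps the transformed remainder, placing each NT's two closing
-- REDUCEs structurally after it; no accumulator and no reversal. Objective: alternative.

-- ===== PORT A =====
-- "REDUCE({})".format(nt)
def pvFmtReduce (nt : String) : String := "REDUCE(" ++ nt ++ ")"

def tg_to_right_branching (actions : List String) : List String :=
  let st := actions.foldl (fun (st : List String × List String) action =>
    if PySem.Str.startswith action "NT(" then
      let nt := PySem.Str.slice action (some 3) (some (-1))
      (st.1 ++ [action], st.2 ++ [pvFmtReduce nt, pvFmtReduce nt])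
    else if PySem.Str.startswith action "REDUCE(" then st
    else (st.1 ++ [action], st.2)) ([], [])
  st.1 ++ st.2.reverse

-- ===== PORT B =====
-- Source B: for a in reversed(actions): result = [a] + result + [r, r] / pass / [a] + result
def tg_to_right_branching_alt (actions : List String) : List String :=
  actions.reverse.foldl (fun (result : List String) a =>
    if PySem.Str.startswith a "NT(" then
      let r := pvFmtReduce (PySem.Str.slice a (some 3) (some (-1)))
      [a] ++ result ++ [r, r]
    else if PySem.Str.startswith a "REDUCE(" then result
    else [a] ++ result) []

-- ===== PRECONDITION & SPEC =====
def Spec_tg_to_right_branching (actions : List String) (out : List String) : Prop := out = tg_to_right_branching_alt actions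
instance (actions : List String) (out : List String) : Decidable (Spec_tg_to_right_branching actions out) := by unfold Spec_tg_to_right_branching; infer_instance

-- ===== CLAIM (what is proved, stated in full; the proofs are below) =====
def Claim_equal_tg_to_right_branching : Prop := ∀ (actions : List String), Dom_tg_to_right_branching actions → Spec_tg_to_right_branching actions (tg_to_right_branching actions)

-- ===== LEMMAS AND PROOFS =====

-- a string starting with "NT(" does not start with "REDUCE("
theorem pv_nt_not_reduce (a : String) (h : PySem.Str.startswith a "NT(" = true) :
    PySem.Str.startswith a "REDUCE(" = false := by
  by_contra hc
  rw [Bool.not_eq_false] at hc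
  simp only [PySem.Str.startswith_eq, PySem.Chars.startswith_iff] at h hc
  obtain ⟨t1, e1⟩ := h
  obtain ⟨t2, e2⟩ := hc
  rw [← e1] at e2
  simp at e2

-- the doubled-REDUCE block contributed by one action
def pvDbl (a : String) : List String :=
  if PySem.Str.startswith a "NT(" then
    [pvFmtReduce (PySem.Str.slice a (some 3) (some (-1))),
     pvFmtReduce (PySem.Str.slice a (some 3) (some (-1)))]
  else []

theorem pv_loopA (xs : List String) (n r : List String) :
    xs.foldl (fun (st : List String × List String) action =>
      if PySem.Str.startswith action "NT(" then
        let nt := PySem.Str.slice action (some 3) (some (-1))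
        (st.1 ++ [action], st.2 ++ [pvFmtReduce nt, pvFmtReduce nt])
      else if PySem.Str.startswith action "REDUCE(" then st
      else (st.1 ++ [action], st.2)) (n, r)
    = (n ++ xs.filter (fun a => !PySem.Str.startswith a "REDUCE("),
       r ++ xs.flatMap pvDbl) := by
  induction xs generalizing n r with
  | nil => simp
  | cons a t ih =>
    simp only [List.foldl_cons]
    by_cases hNT : PySem.Str.startswith a "NT(" = true
    · rw [if_pos hNT, ih]
      have hR := pv_nt_not_reduce a hNT
      simp at hNT hR
      simp [List.flatMap_cons, pvDbl, hNT, hR]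
    · by_cases hR : PySem.Str.startswith a "REDUCE(" = true
      · rw [if_neg hNT, if_pos hR, ih]
        simp only [Bool.not_eq_true] at hNT
        simp at hNT hR
        simp [List.flatMap_cons, pvDbl, hNT, hR]
      · rw [if_neg hNT, if_neg hR, ih]
        simp only [Bool.not_eq_true] at hNT hR
        simp at hNT hR
        simp [List.flatMap_cons, pvDbl, hNT, hR]

-- B's fold wraps its initial accumulator: kept elements (of the traversed prefix,
-- re-reversed) go in front, the doubled closers go behind.
theorem pv_loopB (l : List String) (res : List String) :
    l.foldl (fun (result : List String) a =>
      if PySem.Str.startswith a "NT(" then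
        let r := pvFmtReduce (PySem.Str.slice a (some 3) (some (-1)))
        [a] ++ result ++ [r, r]
      else if PySem.Str.startswith a "REDUCE(" then result
      else [a] ++ result) res
    = (l.reverse.filter (fun a => !PySem.Str.startswith a "REDUCE(")) ++ res
      ++ l.flatMap pvDbl := by
  induction l generalizing res with
  | nil => simp
  | cons a t ih =>
    simp only [List.foldl_cons]
    by_cases hNT : PySem.Str.startswith a "NT(" = true
    · rw [if_pos hNT, ih]
      have hR := pv_nt_not_reduce a hNT
      simp at hNT hR
      simp [pvDbl, hNT, hR, List.filter_append]
    · by_cases hR : PySem.Str.startswith a "REDUCE(" = true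
      · rw [if_neg hNT, if_pos hR, ih]
        simp only [Bool.not_eq_true] at hNT
        simp at hNT hR
        simp [pvDbl, hNT, hR, List.filter_append]
      · rw [if_neg hNT, if_neg hR, ih]
        simp only [Bool.not_eq_true] at hNT hR
        simp at hNT hR
        simp [pvDbl, hNT, hR, List.filter_append]

-- each pvDbl block is a palindrome, so reversing the flatMap = flatMap over the reverse
theorem pv_flatMap_reverse (xs : List String) :
    (xs.flatMap pvDbl).reverse = xs.reverse.flatMap pvDbl := by
  induction xs with
  | nil => simp
  | cons a t ih =>
    have hpal : (pvDbl a).reverse = pvDbl a := by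
      unfold pvDbl; split_ifs <;> simp
    simp [List.flatMap_cons, List.flatMap_append, ih, hpal]

-- ===== VERDICT (by name: the statement is the Claim_ definition above) =====
theorem tg_to_right_branching_spec : Claim_equal_tg_to_right_branching := by
  intro actions _
  unfold Spec_tg_to_right_branching tg_to_right_branching tg_to_right_branching_alt
  rw [show ((([], []) : List String × List String)) = (([] : List String), ([] : List String)) from rfl]
  rw [pv_loopA actions [] [], pv_loopB actions.reverse []]
  simp [pv_flatMap_reverse]
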